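-- pv_equiv track=rewrite | github.com/Antobot/AntobotDevices | antobot_devices_gps/src/utils/f9p_config.py | calculate_checksum
-- ===== SOURCE A (Python) =====
-- def calculate_checksum(packet, length):
--     # calculate ubx checksum
--     chk_a = 0
--     chk_b = 0
--     for i in range(2, length-2):
--         chk_a = chk_a + packet[i]
--         chk_b = chk_b + chk_a
--     packet[length-2] = chk_a & 0xff
--     packet[length-1] = chk_b & 0xff
--
--     return packet
-- ===== SOURCE B (Python) =====
-- def calculate_checksum(packet, length):
--     # calculate ubx checksum: closed-form Fletcher sums instead of a running
--     # accumulator pair; same in-place writes on the same list object.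
--     chk_a = sum(packet[i] for i in range(2, length - 2))
--     chk_b = sum((length - 2 - i) * packet[i] for i in range(2, length - 2))
--     packet[length - 2] = chk_a & 0xff
--     packet[length - 1] = chk_b & 0xff
--     return packet
-- ===== Notes on version B (the rewrite author's own statement) =====
-- stated objective: alternative
-- what changed: Replaces the coupled running-accumulator recurrence (chk_b += chk_a each step) by two independent closed-form sums: chk_a is the plain sum of the checksummed bytes and chk_b the weighted sum with weight (length-2-i) per byte.
import Mathlib
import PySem

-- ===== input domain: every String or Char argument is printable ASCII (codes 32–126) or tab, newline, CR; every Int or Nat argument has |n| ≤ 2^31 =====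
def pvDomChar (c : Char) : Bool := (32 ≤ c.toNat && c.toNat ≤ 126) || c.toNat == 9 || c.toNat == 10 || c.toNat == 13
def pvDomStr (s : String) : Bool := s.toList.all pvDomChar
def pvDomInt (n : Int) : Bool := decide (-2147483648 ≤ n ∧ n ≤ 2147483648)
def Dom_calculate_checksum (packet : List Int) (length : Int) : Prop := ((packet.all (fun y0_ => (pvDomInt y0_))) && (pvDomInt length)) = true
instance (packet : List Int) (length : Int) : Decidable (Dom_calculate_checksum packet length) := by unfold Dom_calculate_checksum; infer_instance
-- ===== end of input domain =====

-- B replaces A's coupled running-accumulator pair by two independent closed-form sums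
-- (plain sum and weighted sum); both mutate the caller's list in place identically,
-- and the equivalence proved here is about the returned list value.

-- ===== PORT A =====
def calculate_checksum (packet : List Int) (length : Int) : List Int :=
  let s := (PySem.List.pyRange 2 (length - 2) 1).foldl
    (fun (ab : Int × Int) i =>
      let x := PySem.List.pyGetD packet i 0
      (ab.1 + x, ab.2 + (ab.1 + x))) (0, 0)
  let packet := PySem.List.pySetD packet (length - 2) (PySem.Int.band s.1 255)
  let packet := PySem.List.pySetD packet (length - 1) (PySem.Int.band s.2 255)
  packet

-- ===== PORT B =====
def calculate_checksum_alt (packet : List Int) (length : Int) : List Int :=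
  let chk_a := ((PySem.List.pyRange 2 (length - 2) 1).map
    (fun i => PySem.List.pyGetD packet i 0)).sum
  let chk_b := ((PySem.List.pyRange 2 (length - 2) 1).map
    (fun i => (length - 2 - i) * PySem.List.pyGetD packet i 0)).sum
  let packet := PySem.List.pySetD packet (length - 2) (PySem.Int.band chk_a 255)
  let packet := PySem.List.pySetD packet (length - 1) (PySem.Int.band chk_b 255)
  packet

-- ===== PRECONDITION & SPEC =====
-- Pre_ excludes exactly the inputs on which the Python A raises IndexError
-- (a loop read past the end of packet, or a tail write whose Python index is out of range).
def Pre_calculate_checksum (packet : List Int) (length : Int) : Prop :=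
  (4 < length → length - 3 < (packet.length : Int)) ∧
  -(packet.length : Int) ≤ length - 2 ∧ length - 1 < (packet.length : Int)
instance (packet : List Int) (length : Int) : Decidable (Pre_calculate_checksum packet length) := by
  unfold Pre_calculate_checksum; infer_instance

def pvWitness_calculate_checksum : List Int × Int := ([181, 98, 6, 1, 3, 0, 1, 6, 1, 0, 0], 11)

def Spec_calculate_checksum (packet : List Int) (length : Int) (out : List Int) : Prop := out = calculate_checksum_alt packet length
instance (packet : List Int) (length : Int) (out : List Int) : Decidable (Spec_calculate_checksum packet length out) := by unfold Spec_calculate_checksum; infer_instance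

-- ===== CLAIM (what is proved, stated in full; the proofs are below) =====
def Claim_equal_calculate_checksum : Prop := ∀ (packet : List Int) (length : Int), Dom_calculate_checksum packet length → Pre_calculate_checksum packet length → Spec_calculate_checksum packet length (calculate_checksum packet length)

-- ===== LEMMAS AND PROOFS =====

-- Folding A's step over range 2..(2+t) yields exactly B's two sums.
theorem fletcher_fold_eq_sums (g : Int → Int) (t : Nat) :
    (PySem.List.pyRange 2 (2 + (t : Int)) 1).foldl
      (fun (ab : Int × Int) i => (ab.1 + g i, ab.2 + (ab.1 + g i))) (0, 0)
    = (((PySem.List.pyRange 2 (2 + (t : Int)) 1).map g).sum,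
       ((PySem.List.pyRange 2 (2 + (t : Int)) 1).map
         (fun i => (2 + (t : Int) - i) * g i)).sum) := by
  induction t with
  | zero => simp
  | succ t ih =>
    have hsplit : PySem.List.pyRange 2 (2 + ((t + 1 : Nat) : Int)) 1
        = PySem.List.pyRange 2 (2 + (t : Int)) 1 ++ [2 + (t : Int)] := by
      have : (2 : Int) + ((t + 1 : Nat) : Int) = (2 + (t : Int)) + 1 := by push_cast; ring
      rw [this, PySem.List.pyRange_one_succ_right (by omega)]
    rw [hsplit]
    simp only [List.foldl_append, List.map_append, List.sum_append, ih, List.foldl_cons,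
      List.foldl_nil, List.map_cons, List.map_nil, List.sum_cons, List.sum_nil]
    rw [Prod.mk.injEq]
    constructor
    · ring
    · have hw : ((PySem.List.pyRange 2 (2 + (t : Int)) 1).map
          (fun i => (2 + ((t + 1 : Nat) : Int) - i) * g i)).sum
          = ((PySem.List.pyRange 2 (2 + (t : Int)) 1).map
              (fun i => (2 + (t : Int) - i) * g i)).sum
            + ((PySem.List.pyRange 2 (2 + (t : Int)) 1).map g).sum := by
        rw [← List.sum_map_add]
        congr 1
        apply List.map_congr_left
        intro i _
        push_cast
        ring
      rw [hw]; push_cast; ring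

theorem calculate_checksum_spec : Claim_equal_calculate_checksum := by
  intro packet length _ _
  unfold Spec_calculate_checksum calculate_checksum calculate_checksum_alt
  by_cases h : length - 2 ≤ 2
  · simp [PySem.List.pyRange_one_eq_nil h]
  · have ht : length - 2 = 2 + (((length - 4).toNat : Nat) : Int) := by omega
    rw [ht, fletcher_fold_eq_sums (fun i => PySem.List.pyGetD packet i 0)]
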